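-- pv_equiv track=rewrite | github.com/matslindh/codingchallenges | adventofcode2023/day01.py | numberfinder
-- ===== SOURCE A (Python) =====
-- from typing import List, Dict
--
-- def numberfinder(input_string: str, valid_values: Dict):
--     _, found = min(
--         filter(lambda x: x[0] >= 0,
--                tuple(
--                     (input_string.find(search), search)
--                     for search in valid_values.keys()
--                )
--         )
--     )
--
--     _, found_last = max(
--         (input_string.rfind(search), search)
--         for search in valid_values.keys()
--     )
--
--     return int(f"{valid_values[found]}{valid_values[found_last]}")
-- ===== SOURCE B (Python) =====
-- def numberfinder(input_string: str, valid_values: dict):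
--     n = len(input_string)
--     for i in range(n + 1):
--         matches = [k for k in valid_values if input_string.startswith(k, i)]
--         if matches:
--             found = min(matches)
--             break
--     for i in range(n, -1, -1):
--         matches = [k for k in valid_values if input_string.startswith(k, i)]
--         if matches:
--             found_last = max(matches)
--             break
--     return int(f"{valid_values[found]}{valid_values[found_last]}")
-- ===== Notes on version B (the rewrite author's own statement) =====
-- stated objective: alternative
-- what changed: A computes per-key (find, key)/(rfind, key) tuples and takes the lexicographic min/max of those tuple sequences; B instead scans positions of the input (ascending for the first word, descending for the last), stops at the first position where any key matches, and tie-breaks among the keys matching there lexicographically.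
import Mathlib
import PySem

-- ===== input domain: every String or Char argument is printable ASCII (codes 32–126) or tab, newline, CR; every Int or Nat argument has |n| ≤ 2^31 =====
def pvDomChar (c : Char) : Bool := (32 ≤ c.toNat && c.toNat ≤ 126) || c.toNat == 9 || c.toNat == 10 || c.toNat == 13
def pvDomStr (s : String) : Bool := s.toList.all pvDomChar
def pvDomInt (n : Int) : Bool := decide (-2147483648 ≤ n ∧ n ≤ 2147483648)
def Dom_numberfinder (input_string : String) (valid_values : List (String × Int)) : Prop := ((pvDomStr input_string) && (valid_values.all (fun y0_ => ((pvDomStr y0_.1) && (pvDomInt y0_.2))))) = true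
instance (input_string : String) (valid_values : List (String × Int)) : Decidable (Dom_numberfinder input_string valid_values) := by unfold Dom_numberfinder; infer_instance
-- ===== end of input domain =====

-- B replaces A's per-key find/rfind + min/max over (index, key) tuples by a position-major scan
-- (first/last position with any matching key, tie-broken lexicographically); alternative, same cost.


-- ===== PORT A =====
def numberfinder (input_string : String) (valid_values : List (String × Int)) : Int :=
  let ks := PySem.Dict.keys (PySem.Dict.mk valid_values)
  let cand := (ks.map (fun search => (PySem.Str.find input_string search, search))).filter
      (fun x => decide (0 ≤ x.1))
  match PySem.List.min? cand (fun x => toLex x) with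
  | none => 0          -- empty sequence: Python raises ValueError (excluded by Pre_)
  | some m =>
    match PySem.List.max? (ks.map (fun search => (PySem.Str.rfind input_string search, search)))
        (fun x => toLex x) with
    | none => 0        -- empty sequence: Python raises ValueError (excluded by Pre_)
    | some m2 =>
      (PySem.Int.ofChars?
        ((PySem.Int.toStr (PySem.Dict.getD (PySem.Dict.mk valid_values) m.2 0)).toList ++
         (PySem.Int.toStr (PySem.Dict.getD (PySem.Dict.mk valid_values) m2.2 0)).toList)).getD 0

-- ===== PORT B =====
-- [k for k in valid_values if input_string.startswith(k, i)]
def pvMatchesAt (cs : List Char) (valid_values : List (String × Int)) (i : Nat) : List String :=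
  (valid_values.map Prod.fst).filter (fun k => PySem.Chars.startswith (cs.drop i) k.toList)

-- the ascending loop with break: first i with a match, then min(matches)
def pvScanFirst (cs : List Char) (valid_values : List (String × Int)) : List Nat → Option String
  | [] => none
  | i :: rest =>
    let ms := pvMatchesAt cs valid_values i
    if ms = [] then pvScanFirst cs valid_values rest
    else PySem.List.min? ms (fun k => k)

-- the descending loop with break: last i with a match, then max(matches)
def pvScanLast (cs : List Char) (valid_values : List (String × Int)) : List Nat → Option String
  | [] => none
  | i :: rest =>
    let ms := pvMatchesAt cs valid_values i
    if ms = [] then pvScanLast cs valid_values rest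
    else PySem.List.max? ms (fun k => k)

def numberfinder_alt (input_string : String) (valid_values : List (String × Int)) : Int :=
  let cs := input_string.toList
  let n := cs.length
  match pvScanFirst cs valid_values (List.range (n+1)),
        pvScanLast cs valid_values (List.range (n+1)).reverse with
  | some f, some fl =>
      (PySem.Int.ofChars?
        ((PySem.Int.toStr (PySem.Dict.getD (PySem.Dict.mk valid_values) f 0)).toList ++
         (PySem.Int.toStr (PySem.Dict.getD (PySem.Dict.mk valid_values) fl 0)).toList)).getD 0
  | _, _ => 0          -- no key occurs: Python raises (excluded by Pre_)

-- ===== PRECONDITION & SPEC =====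
-- Pre_ excludes (a) association lists with duplicate keys, on which the Python dict argument
-- collapses entries and the association-list representation is ambiguous, (b) inputs where no key
-- occurs in input_string (A's min() raises ValueError), and (c) inputs whose rightmost-last-
-- occurrence key (ties: lexicographically largest) maps to a negative value, where A's final
-- int(f"..") raises ValueError on the embedded minus sign.
def Pre_numberfinder (input_string : String) (valid_values : List (String × Int)) : Prop :=
  (valid_values.map Prod.fst).Nodup ∧
  (∃ p ∈ valid_values, PySem.Str.isIn p.1 input_string = true) ∧
  (∃ p ∈ valid_values, 0 ≤ p.2 ∧ ∀ q ∈ valid_values, q.1 ≠ p.1 →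
      toLex (PySem.Str.rfind input_string q.1, q.1) < toLex (PySem.Str.rfind input_string p.1, p.1))
instance (input_string : String) (valid_values : List (String × Int)) : Decidable (Pre_numberfinder input_string valid_values) := by unfold Pre_numberfinder; infer_instance

def pvWitness_numberfinder : String × (List (String × Int)) := ("x12y", [("1", 1), ("2", 2)])

def Spec_numberfinder (input_string : String) (valid_values : List (String × Int)) (out : Int) : Prop := out = numberfinder_alt input_string valid_values
instance (input_string : String) (valid_values : List (String × Int)) (out : Int) : Decidable (Spec_numberfinder input_string valid_values out) := by unfold Spec_numberfinder; infer_instance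

-- ===== CLAIM (what is proved, stated in full; the proofs are below) =====
def Claim_equal_numberfinder : Prop := ∀ (input_string : String) (valid_values : List (String × Int)), Dom_numberfinder input_string valid_values → Pre_numberfinder input_string valid_values → Spec_numberfinder input_string valid_values (numberfinder input_string valid_values)

-- ===== LEMMAS AND PROOFS =====

-- find s k ≤ i whenever k is a prefix of s.drop i (find is the first match)
theorem pv_find_le_of_pref {s k : List Char} {i : Nat} (h : k <+: s.drop i) :
    PySem.Chars.find s k ≤ (i : Int) := by
  have hnn : 0 ≤ PySem.Chars.find s k := by
    rw [PySem.Chars.find_nonneg_iff, ← PySem.Chars.isIn_iff_infix,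
        ← PySem.Chars.exists_prefix_drop_iff_isIn]
    exact ⟨i, h⟩
  by_contra hlt
  push Not at hlt
  exact (PySem.Chars.find_spec hnn).2 i (by omega) h

-- rfind.go characterised: either no match at any position ≤ j, or it is the greatest match ≤ j
theorem pv_rfind_go_cases (s k : List Char) (j : Nat) :
    (PySem.Chars.rfind.go s k j = -1 ∧ ∀ i ≤ j, ¬ k <+: s.drop i) ∨
    (∃ m : Nat, PySem.Chars.rfind.go s k j = (m : Int) ∧ m ≤ j ∧ k <+: s.drop m ∧
      ∀ i, m < i → i ≤ j → ¬ k <+: s.drop i) := by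
  induction j with
  | zero =>
    by_cases h : k.isPrefixOf s
    · right
      exact ⟨0, by simp [PySem.Chars.rfind.go, h], by omega,
        by simpa using (List.isPrefixOf_iff_prefix.mp h), by omega⟩
    · left
      refine ⟨by simp [PySem.Chars.rfind.go, h], ?_⟩
      intro i hi
      interval_cases i
      simpa using fun hp => h (List.isPrefixOf_iff_prefix.mpr hp)
  | succ j ih =>
    have hgo : PySem.Chars.rfind.go s k (j+1) =
        if k.isPrefixOf (s.drop (j+1)) then ((j : Int)+1) else PySem.Chars.rfind.go s k j := by
      simp [PySem.Chars.rfind.go]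
    by_cases h : k.isPrefixOf (s.drop (j+1))
    · right
      refine ⟨j+1, by rw [hgo, if_pos h]; push_cast; ring, by omega,
        List.isPrefixOf_iff_prefix.mp h, fun i h1 h2 => by omega⟩
    · rw [hgo, if_neg h]
      have hnot : ¬ k <+: s.drop (j+1) := fun hp => h (List.isPrefixOf_iff_prefix.mpr hp)
      rcases ih with ⟨he, hall⟩ | ⟨m, he, hm, hp, hmax⟩
      · left
        refine ⟨he, fun i hi => ?_⟩
        rcases Nat.lt_or_ge i (j+1) with hlt | hge
        · exact hall i (by omega)
        · have : i = j + 1 := by omega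
          subst this; exact hnot
      · right
        refine ⟨m, he, by omega, hp, fun i h1 h2 => ?_⟩
        rcases Nat.lt_or_ge i (j+1) with hlt | hge
        · exact hmax i h1 (by omega)
        · have : i = j + 1 := by omega
          subst this; exact hnot

-- i ≤ len and a match at i force rfind ≥ i
theorem pv_le_rfind_of_pref {s k : List Char} {i : Nat} (hi : i ≤ s.length)
    (h : k <+: s.drop i) : (i : Int) ≤ PySem.Chars.rfind s k := by
  unfold PySem.Chars.rfind
  rcases pv_rfind_go_cases s k s.length with ⟨_, hall⟩ | ⟨m, he, hm, _, hmax⟩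
  · exact absurd h (hall i hi)
  · rw [he]
    by_contra hlt
    push Not at hlt
    exact hmax i (by exact_mod_cast hlt) hi h

-- rfind ≥ 0 gives a match at rfind.toNat, within the length
theorem pv_rfind_spec {s k : List Char} (h : 0 ≤ PySem.Chars.rfind s k) :
    (PySem.Chars.rfind s k).toNat ≤ s.length ∧ k <+: s.drop (PySem.Chars.rfind s k).toNat := by
  unfold PySem.Chars.rfind at *
  rcases pv_rfind_go_cases s k s.length with ⟨he, _⟩ | ⟨m, he, hm, hp, _⟩
  · rw [he] at h; omega
  · rw [he] at h ⊢; simpa using ⟨hm, hp⟩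

-- uniqueness of min?/max? under an injective key
theorem pv_min?_eq {α κ : Type} [LinearOrder κ] {xs : List α} {key : α → κ}
    (hinj : ∀ a b, key a = key b → a = b) {m : α} (hm : m ∈ xs)
    (hmin : ∀ y ∈ xs, key m ≤ key y) : PySem.List.min? xs key = some m := by
  cases h : PySem.List.min? xs key with
  | none => rw [PySem.List.min?_eq_none_iff] at h; subst h; cases hm
  | some m' =>
    have h1 := PySem.List.min?_isMin h m hm
    have h2 := hmin m' (PySem.List.min?_mem h)
    rw [hinj m' m (le_antisymm h1 h2)]

theorem pv_max?_eq {α κ : Type} [LinearOrder κ] {xs : List α} {key : α → κ}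
    (hinj : ∀ a b, key a = key b → a = b) {m : α} (hm : m ∈ xs)
    (hmax : ∀ y ∈ xs, key y ≤ key m) : PySem.List.max? xs key = some m := by
  cases h : PySem.List.max? xs key with
  | none => rw [PySem.List.max?_eq_none_iff] at h; subst h; cases hm
  | some m' =>
    have h1 := PySem.List.max?_isMax h m hm
    have h2 := hmax m' (PySem.List.max?_mem h)
    rw [hinj m' m (le_antisymm h2 h1)]

-- membership in pvMatchesAt
theorem pv_mem_matchesAt {cs : List Char} {vv : List (String × Int)} {i : Nat} {k : String} :
    k ∈ pvMatchesAt cs vv i ↔ k ∈ vv.map Prod.fst ∧ k.toList <+: cs.drop i := by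
  simp [pvMatchesAt, List.mem_filter, PySem.Chars.startswith_iff]

-- the ascending scan stops at the least position carrying a match
theorem pv_scanFirst_eq {cs : List Char} {vv : List (String × Int)} {ps : List Nat} {i : Nat}
    (hps : ps.Pairwise (· < ·)) (hi : i ∈ ps) (hne : pvMatchesAt cs vv i ≠ [])
    (hbefore : ∀ j ∈ ps, j < i → pvMatchesAt cs vv j = []) :
    pvScanFirst cs vv ps = PySem.List.min? (pvMatchesAt cs vv i) (fun k => k) := by
  induction ps with
  | nil => cases hi
  | cons p rest ih =>
    rcases List.mem_cons.mp hi with rfl | hmem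
    · rw [pvScanFirst, if_neg hne]
    · have hp_lt : p < i := (List.pairwise_cons.mp hps).1 i hmem
      have hp_empty : pvMatchesAt cs vv p = [] := hbefore p (List.mem_cons_self ..) hp_lt
      rw [pvScanFirst, if_pos hp_empty]
      exact ih (List.pairwise_cons.mp hps).2 hmem
        (fun j hj hlt => hbefore j (List.mem_cons_of_mem _ hj) hlt)

-- the descending scan stops at the greatest position carrying a match
theorem pv_scanLast_eq {cs : List Char} {vv : List (String × Int)} {ps : List Nat} {i : Nat}
    (hps : ps.Pairwise (· > ·)) (hi : i ∈ ps) (hne : pvMatchesAt cs vv i ≠ [])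
    (hafter : ∀ j ∈ ps, i < j → pvMatchesAt cs vv j = []) :
    pvScanLast cs vv ps = PySem.List.max? (pvMatchesAt cs vv i) (fun k => k) := by
  induction ps with
  | nil => cases hi
  | cons p rest ih =>
    rcases List.mem_cons.mp hi with rfl | hmem
    · rw [pvScanLast, if_neg hne]
    · have hp_gt : i < p := (List.pairwise_cons.mp hps).1 i hmem
      have hp_empty : pvMatchesAt cs vv p = [] := hafter p (List.mem_cons_self ..) hp_gt
      rw [pvScanLast, if_pos hp_empty]
      exact ih (List.pairwise_cons.mp hps).2 hmem
        (fun j hj hlt => hafter j (List.mem_cons_of_mem _ hj) hlt)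

-- first part: A's lex-min (find k, k) and B's ascending scan name the same key
theorem pv_first_agree (s : String) (vv : List (String × Int)) {m : Int × String}
    (hm : PySem.List.min?
      (((vv.map Prod.fst).map (fun search => (PySem.Str.find s search, search))).filter
        (fun x => decide (0 ≤ x.1))) (fun x => toLex x) = some m) :
    pvScanFirst s.toList vv (List.range (s.toList.length + 1)) = some m.2 := by
  obtain ⟨hmap, hpos⟩ := List.mem_filter.mp (PySem.List.min?_mem hm)
  obtain ⟨km, hkm, hmeq⟩ := List.mem_map.mp hmap
  have hge : 0 ≤ PySem.Chars.find s.toList km.toList := by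
    have h0 := of_decide_eq_true hpos
    rw [← hmeq] at h0
    simpa [PySem.Str.find_eq] using h0
  subst hmeq
  have hspec := PySem.Chars.find_spec hge
  have hlen := PySem.Chars.find_le_length s.toList km.toList
  have hi0 : ((PySem.Chars.find s.toList km.toList).toNat : Int)
      = PySem.Chars.find s.toList km.toList := Int.toNat_of_nonneg hge
  -- every matching key at any position j yields a candidate pair dominated by the minimum
  have hminle : ∀ k ∈ vv.map Prod.fst, ∀ j : Nat, k.toList <+: s.toList.drop j →
      toLex (PySem.Str.find s km, km) ≤ toLex (PySem.Str.find s k, k) := by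
    intro k hk j hpref
    apply PySem.List.min?_isMin hm
    refine List.mem_filter.mpr ⟨List.mem_map.mpr ⟨k, hk, rfl⟩, ?_⟩
    simp only [decide_eq_true_eq, PySem.Str.find_eq]
    rw [PySem.Chars.find_nonneg_iff, ← PySem.Chars.isIn_iff_infix,
        ← PySem.Chars.exists_prefix_drop_iff_isIn]
    exact ⟨j, hpref⟩
  simp only [PySem.Str.find_eq] at hminle
  have hmem0 : km ∈ pvMatchesAt s.toList vv (PySem.Chars.find s.toList km.toList).toNat :=
    pv_mem_matchesAt.mpr ⟨hkm, hspec.1⟩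
  rw [pv_scanFirst_eq (List.pairwise_lt_range)
      (i := (PySem.Chars.find s.toList km.toList).toNat)
      (List.mem_range.mpr (by omega))
      (List.ne_nil_of_mem hmem0)
      ?before]
  case before =>
    intro j _ hj
    rw [List.eq_nil_iff_forall_not_mem]
    intro k hkmem
    obtain ⟨hk, hpref⟩ := pv_mem_matchesAt.mp hkmem
    have hle := hminle k hk j hpref
    have hfle : PySem.Chars.find s.toList k.toList ≤ (j : Int) := pv_find_le_of_pref hpref
    rw [Prod.Lex.toLex_le_toLex] at hle
    rcases hle with hlt | ⟨heq, _⟩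
    · simp only at hlt; omega
    · simp only at heq; omega
  · apply pv_min?_eq (fun a b h => h) hmem0
    intro k hkmem
    obtain ⟨hk, hpref⟩ := pv_mem_matchesAt.mp hkmem
    have hle := hminle k hk _ hpref
    have hfle : PySem.Chars.find s.toList k.toList
        ≤ ((PySem.Chars.find s.toList km.toList).toNat : Int) := pv_find_le_of_pref hpref
    rw [Prod.Lex.toLex_le_toLex] at hle
    rcases hle with hlt | ⟨_, hle2⟩
    · simp only at hlt; omega
    · exact hle2

-- last part: A's lex-max (rfind k, k) and B's descending scan name the same key
theorem pv_last_agree (s : String) (vv : List (String × Int)) {m2 : Int × String}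
    (h2 : ∃ p ∈ vv, PySem.Str.isIn p.1 s = true)
    (hm2 : PySem.List.max?
      ((vv.map Prod.fst).map (fun search => (PySem.Str.rfind s search, search)))
      (fun x => toLex x) = some m2) :
    pvScanLast s.toList vv (List.range (s.toList.length + 1)).reverse = some m2.2 := by
  obtain ⟨km, hkm, hmeq⟩ := List.mem_map.mp (PySem.List.max?_mem hm2)
  subst hmeq
  simp only [PySem.Str.rfind_eq] at hm2 ⊢
  -- the minimum dominated: every key's (rfind, key) pair is ≤ the maximum
  have hmaxge : ∀ k ∈ vv.map Prod.fst,
      toLex (PySem.Chars.rfind s.toList k.toList, k)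
        ≤ toLex (PySem.Chars.rfind s.toList km.toList, km) := by
    intro k hk
    have := PySem.List.max?_isMax hm2 (PySem.Str.rfind s k, k)
      (List.mem_map.mpr ⟨k, hk, rfl⟩)
    simpa [PySem.Str.rfind_eq] using this
  -- some key occurs in s, so the maximal rfind is ≥ 0
  obtain ⟨p, hp, hin⟩ := h2
  have hfin : 0 ≤ PySem.Chars.find s.toList p.1.toList :=
    (PySem.Chars.find_nonneg_iff _ _).mpr ((PySem.Str.isIn_iff_infix _ _).mp hin)
  have hfs := PySem.Chars.find_spec hfin
  have hfl := PySem.Chars.find_le_length s.toList p.1.toList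
  have hrp : ((PySem.Chars.find s.toList p.1.toList).toNat : Int)
      ≤ PySem.Chars.rfind s.toList p.1.toList :=
    pv_le_rfind_of_pref (by omega) hfs.1
  have hge2 : 0 ≤ PySem.Chars.rfind s.toList km.toList := by
    have hle := hmaxge p.1 (List.mem_map.mpr ⟨p, hp, rfl⟩)
    rw [Prod.Lex.toLex_le_toLex] at hle
    rcases hle with hlt | ⟨heq, _⟩
    · simp only at hlt; omega
    · simp only at heq; omega
  have hrspec := pv_rfind_spec hge2
  have hi1 : ((PySem.Chars.rfind s.toList km.toList).toNat : Int)
      = PySem.Chars.rfind s.toList km.toList := Int.toNat_of_nonneg hge2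
  have hmem0 : km ∈ pvMatchesAt s.toList vv (PySem.Chars.rfind s.toList km.toList).toNat :=
    pv_mem_matchesAt.mpr ⟨hkm, hrspec.2⟩
  rw [pv_scanLast_eq (List.pairwise_reverse.mpr List.pairwise_lt_range)
      (i := (PySem.Chars.rfind s.toList km.toList).toNat)
      (List.mem_reverse.mpr (List.mem_range.mpr (by omega)))
      (List.ne_nil_of_mem hmem0)
      ?after]
  case after =>
    intro j hjmem hj
    have hjle : j ≤ s.toList.length := by
      have := List.mem_range.mp (List.mem_reverse.mp hjmem); omega
    rw [List.eq_nil_iff_forall_not_mem]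
    intro k hkmem
    obtain ⟨hk, hpref⟩ := pv_mem_matchesAt.mp hkmem
    have hrk : (j : Int) ≤ PySem.Chars.rfind s.toList k.toList :=
      pv_le_rfind_of_pref hjle hpref
    have hle := hmaxge k hk
    rw [Prod.Lex.toLex_le_toLex] at hle
    rcases hle with hlt | ⟨heq, _⟩
    · simp only at hlt; omega
    · simp only at heq; omega
  · apply pv_max?_eq (fun a b h => h) hmem0
    intro k hkmem
    obtain ⟨hk, hpref⟩ := pv_mem_matchesAt.mp hkmem
    have hrk : ((PySem.Chars.rfind s.toList km.toList).toNat : Int)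
        ≤ PySem.Chars.rfind s.toList k.toList := pv_le_rfind_of_pref hrspec.1 hpref
    have hle := hmaxge k hk
    rw [Prod.Lex.toLex_le_toLex] at hle
    rcases hle with hlt | ⟨_, hle2⟩
    · simp only at hlt; omega
    · exact hle2

-- ===== VERDICT (by name: the statement is the Claim_ definition above) =====
theorem numberfinder_spec : Claim_equal_numberfinder := by
  intro s vv _hdom hpre
  obtain ⟨_hnd, h2, _h3⟩ := hpre
  obtain ⟨p, hp, hin⟩ := h2
  have hks : PySem.Dict.keys (PySem.Dict.mk vv) = vv.map Prod.fst := rfl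
  have hp1 : p.1 ∈ vv.map Prod.fst := List.mem_map.mpr ⟨p, hp, rfl⟩
  unfold Spec_numberfinder numberfinder numberfinder_alt
  simp only [hks]
  cases hmin : PySem.List.min?
      (((vv.map Prod.fst).map (fun search => (PySem.Str.find s search, search))).filter
        (fun x => decide (0 ≤ x.1))) (fun x => toLex x) with
  | none =>
    exfalso
    rw [PySem.List.min?_eq_none_iff, List.eq_nil_iff_forall_not_mem] at hmin
    refine hmin (PySem.Str.find s p.1, p.1)
      (List.mem_filter.mpr ⟨List.mem_map.mpr ⟨p.1, hp1, rfl⟩, ?_⟩)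
    simp only [decide_eq_true_eq]
    rw [PySem.Str.find_eq, PySem.Chars.find_nonneg_iff]
    exact (PySem.Str.isIn_iff_infix _ _).mp hin
  | some m =>
    cases hmax : PySem.List.max?
        ((vv.map Prod.fst).map (fun search => (PySem.Str.rfind s search, search)))
        (fun x => toLex x) with
    | none =>
      exfalso
      rw [PySem.List.max?_eq_none_iff, List.eq_nil_iff_forall_not_mem] at hmax
      exact hmax (PySem.Str.rfind s p.1, p.1) (List.mem_map.mpr ⟨p.1, hp1, rfl⟩)
    | some m2 =>
      rw [pv_first_agree s vv hmin, pv_last_agree s vv ⟨p, hp, hin⟩ hmax]
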